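-- pv_equiv track=rewrite | github.com/yrapop01/hut | definer.py | flatjoin
-- ===== SOURCE A (Python) =====
-- def flatjoin(items, sep):
--     newlist = []
--     for item in items[:-1]:
--         newlist.extend(item)
--         newlist.append(sep)
--     if items:
--         newlist.extend(items[-1])
--     return newlist
-- ===== SOURCE B (Python) =====
-- def flatjoin(items, sep):
--     if not items:
--         return []
--     parts = [items[0]]
--     for item in items[1:]:
--         parts.append([sep])
--         parts.append(item)
--     return [x for part in parts for x in part]
-- ===== Notes on version B (the rewrite author's own statement) =====
-- stated objective: alternative
-- what changed: Replaces A's slice-off-the-last loop (extend+append sep each round, then extend the tail) with a build-then-flatten two-phase decomposition: interleave [sep] chunks between the sublists, then flatten with one comprehension.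
import Mathlib
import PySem

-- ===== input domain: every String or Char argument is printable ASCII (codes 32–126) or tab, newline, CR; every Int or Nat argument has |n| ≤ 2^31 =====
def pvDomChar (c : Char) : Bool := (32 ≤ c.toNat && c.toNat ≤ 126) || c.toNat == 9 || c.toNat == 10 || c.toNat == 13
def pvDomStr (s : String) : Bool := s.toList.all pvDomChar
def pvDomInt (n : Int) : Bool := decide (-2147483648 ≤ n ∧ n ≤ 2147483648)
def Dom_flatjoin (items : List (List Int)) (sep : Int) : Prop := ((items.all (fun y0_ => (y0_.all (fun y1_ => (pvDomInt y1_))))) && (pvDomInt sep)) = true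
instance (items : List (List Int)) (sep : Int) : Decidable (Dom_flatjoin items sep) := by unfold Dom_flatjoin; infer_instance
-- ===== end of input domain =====

-- B replaces A's slice-off-the-last loop with a build-then-flatten decomposition (alternative, same cost).

-- ===== PORT A =====
def flatjoin (items : List (List Int)) (sep : Int) : List Int :=
  let newlist : List Int := []
  let newlist := (PySem.List.slice items none (some (-1))).foldl
    (fun acc item => acc ++ item ++ [sep]) newlist
  if items.isEmpty then newlist
  else newlist ++ (items.getLast?.getD [])   -- items[-1], guarded by 'if items'

-- ===== PORT B =====
def flatjoin_alt (items : List (List Int)) (sep : Int) : List Int :=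
  match items with
  | [] => []
  | h :: t =>
    let parts : List (List Int) := h :: t.flatMap (fun item => [[sep], item])
    parts.flatMap (fun part => part)

-- ===== PRECONDITION & SPEC =====
def Spec_flatjoin (items : List (List Int)) (sep : Int) (out : List Int) : Prop := out = flatjoin_alt items sep
instance (items : List (List Int)) (sep : Int) (out : List Int) : Decidable (Spec_flatjoin items sep out) := by unfold Spec_flatjoin; infer_instance

-- ===== CLAIM (what is proved, stated in full; the proofs are below) =====
def Claim_equal_flatjoin : Prop := ∀ (items : List (List Int)) (sep : Int), Dom_flatjoin items sep → Spec_flatjoin items sep (flatjoin items sep)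

-- ===== LEMMAS AND PROOFS =====

theorem flatjoin_alt_cons (h : List Int) (t : List (List Int)) (sep : Int) :
    flatjoin_alt (h :: t) sep = h ++ t.flatMap (fun item => sep :: item) := by
  simp [flatjoin_alt, List.flatMap_def]
  induction t with
  | nil => simp
  | cons y t ih => simp_all

theorem flatjoin_closed (items : List (List Int)) (sep : Int) :
    flatjoin items sep =
      items.dropLast.flatMap (fun item => item ++ [sep]) ++ (items.getLast?.getD []) := by
  have hf : (fun (acc item : List Int) => acc ++ item ++ [sep])
      = (fun (acc item : List Int) => acc ++ (item ++ [sep])) := by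
    funext a b; simp
  unfold flatjoin
  simp only [PySem.List.slice_to_neg_one, hf, PySem.List.foldl_append_eq_flatMap]
  cases items <;> simp

theorem flatten_sep (h : List Int) (t : List (List Int)) (sep : Int) :
    (h :: t).dropLast.flatMap (fun item => item ++ [sep]) ++ ((h :: t).getLast?.getD [])
      = h ++ t.flatMap (fun item => sep :: item) := by
  induction t generalizing h with
  | nil => simp
  | cons y t' ih =>
    have := ih y
    simp only [List.dropLast_cons₂, List.flatMap_cons, List.getLast?_cons_cons] at *
    simp only [List.append_assoc] at *
    rw [this]; simp

-- ===== VERDICT (by name: the statement is the Claim_ definition above) =====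
theorem flatjoin_spec : Claim_equal_flatjoin := by
  intro items sep _
  show flatjoin items sep = flatjoin_alt items sep
  cases items with
  | nil => simp [flatjoin, flatjoin_alt]
           rw [PySem.List.slice_to_neg_one]; simp
  | cons h t => rw [flatjoin_closed, flatjoin_alt_cons, flatten_sep]
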